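-- pv_equiv track=rewrite | github.com/zpatty/drl-turtle | ros2_ws/src/turtle_hardware/turtle_hardware/mjc_turtle_robot/gmsh_cleaner.py | _get_maximum_occurrence
-- ===== SOURCE A (Python) =====
-- from collections import Counter
-- from typing import Dict, List, Tuple
--
-- def _get_maximum_occurrence(surfaces_index: List[int]):
--     d = Counter(surfaces_index)
--     max_occurrence = 0
--     for s in surfaces_index:
--         occ = d[s]
--         if occ > max_occurrence:
--             max_occurrence = occ
--     return max_occurrence
-- ===== SOURCE B (Python) =====
-- def _get_maximum_occurrence(surfaces_index):
--     counts = {}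
--     best = 0
--     for s in surfaces_index:
--         c = counts.get(s, 0) + 1
--         counts[s] = c
--         if c > best:
--             best = c
--     return best
-- ===== Notes on version B (the rewrite author's own statement) =====
-- stated objective: simpler
-- what changed: Fuses A's two passes (build a Counter, then rescan the list taking the max looked-up count) into one loop that increments a plain dict count and updates the running maximum immediately, dropping the Counter and the second traversal.
import Mathlib
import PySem

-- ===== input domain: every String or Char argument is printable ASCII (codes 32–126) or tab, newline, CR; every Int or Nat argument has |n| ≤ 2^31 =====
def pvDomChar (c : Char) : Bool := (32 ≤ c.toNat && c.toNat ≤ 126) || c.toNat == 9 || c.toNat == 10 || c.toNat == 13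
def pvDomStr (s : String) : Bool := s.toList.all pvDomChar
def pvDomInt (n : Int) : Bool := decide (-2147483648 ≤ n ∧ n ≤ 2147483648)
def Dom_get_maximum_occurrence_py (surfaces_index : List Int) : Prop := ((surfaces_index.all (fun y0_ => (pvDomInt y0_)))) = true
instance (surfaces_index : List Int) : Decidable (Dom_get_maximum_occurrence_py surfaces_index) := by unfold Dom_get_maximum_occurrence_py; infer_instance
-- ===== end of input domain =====

-- B replaces A's two passes (Counter build, then max-scan) by a single loop that
-- counts in a plain dict and updates the running maximum immediately (objective: simpler).

-- ===== PORT A =====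
def get_maximum_occurrence_py (surfaces_index : List Int) : Int :=
  let d := PySem.Dict.counter surfaces_index
  surfaces_index.foldl (fun max_occurrence s =>
    let occ := d.getD s 0
    if occ > max_occurrence then occ else max_occurrence) 0

-- ===== PORT B =====
def get_maximum_occurrence_py_alt (surfaces_index : List Int) : Int :=
  (surfaces_index.foldl (fun (st : PySem.Dict Int Int × Int) s =>
      let c := st.1.getD s 0 + 1
      (st.1.insert s c, if c > st.2 then c else st.2))
    (PySem.Dict.empty, 0)).2

-- ===== PRECONDITION & SPEC =====
def Spec_get_maximum_occurrence_py (surfaces_index : List Int) (out : Int) : Prop := out = get_maximum_occurrence_py_alt surfaces_index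
instance (surfaces_index : List Int) (out : Int) : Decidable (Spec_get_maximum_occurrence_py surfaces_index out) := by unfold Spec_get_maximum_occurrence_py; infer_instance

-- ===== CLAIM (what is proved, stated in full; the proofs are below) =====
def Claim_equal_get_maximum_occurrence_py : Prop := ∀ (surfaces_index : List Int), Dom_get_maximum_occurrence_py surfaces_index → Spec_get_maximum_occurrence_py surfaces_index (get_maximum_occurrence_py surfaces_index)

-- ===== LEMMAS AND PROOFS =====

-- the common value: max multiplicity of an element of l (0 for [])
def pvMaxMult (l : List Int) : Nat :=
  l.foldl (fun m s => max m (l.count s)) 0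

theorem pv_foldl_max_le_iff (f : Int → Nat) (xs : List Int) (a b : Nat) :
    xs.foldl (fun m s => max m (f s)) a ≤ b ↔ a ≤ b ∧ ∀ s ∈ xs, f s ≤ b := by
  induction xs generalizing a with
  | nil => simp
  | cons x xs ih =>
    simp only [List.foldl_cons, ih, List.mem_cons]
    constructor
    · rintro ⟨h1, h2⟩
      exact ⟨le_trans (le_max_left _ _) h1,
        fun s hs => hs.elim (fun e => e ▸ le_trans (le_max_right _ _) h1) (h2 s)⟩
    · rintro ⟨h1, h2⟩
      exact ⟨max_le h1 (h2 x (Or.inl rfl)), fun s hs => h2 s (Or.inr hs)⟩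

theorem pv_elem_le_foldl (f : Int → Nat) (xs : List Int) {s : Int} (hs : s ∈ xs) :
    f s ≤ xs.foldl (fun m s => max m (f s)) 0 :=
  ((pv_foldl_max_le_iff f xs 0 _).mp le_rfl).2 s hs

theorem pv_maxMult_append (l : List Int) (x : Int) :
    pvMaxMult (l ++ [x]) = max (pvMaxMult l) ((l ++ [x]).count x) := by
  unfold pvMaxMult
  rw [List.foldl_append, List.foldl_cons, List.foldl_nil]
  have hcnt : ∀ s : Int, (l ++ [x]).count s = l.count s + (if x = s then 1 else 0) := by
    intro s; simp [List.count_append, List.count_singleton]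
  apply Nat.le_antisymm
  · apply max_le
    · rw [pv_foldl_max_le_iff]
      refine ⟨Nat.zero_le _, fun s hs => ?_⟩
      by_cases hx : x = s
      · subst hx; exact le_max_right _ _
      · rw [hcnt s, if_neg hx]
        simpa using le_trans (pv_elem_le_foldl (fun s => l.count s) l hs) (le_max_left _ _)
    · exact le_max_right _ _
  · apply max_le
    · rw [pv_foldl_max_le_iff]
      refine ⟨Nat.zero_le _, fun s hs => ?_⟩
      have h1 : l.count s ≤ (l ++ [x]).count s := by rw [hcnt s]; omega
      exact le_trans (le_trans h1 (pv_elem_le_foldl (fun s => (l ++ [x]).count s) l hs))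
        (le_max_left _ _)
    · exact le_max_right _ _

theorem pv_foldl_cast (f : Int → Nat) (xs : List Int) (a : Nat) :
    xs.foldl (fun m s => if ((f s : Int)) > m then (f s : Int) else m) (a : Int)
      = ((xs.foldl (fun m s => max m (f s)) a : Nat) : Int) := by
  induction xs generalizing a with
  | nil => simp
  | cons x xs ih =>
    simp only [List.foldl_cons]
    have : (if ((f x : Int)) > (a : Int) then (f x : Int) else (a : Int)) = ((max a (f x) : Nat) : Int) := by
      split_ifs with h <;> push_cast at h ⊢ <;> omega
    rw [this, ih]

-- A computes the max multiplicity
theorem pv_A_eq (l : List Int) :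
    get_maximum_occurrence_py l = (pvMaxMult l : Int) := by
  unfold get_maximum_occurrence_py pvMaxMult
  simp only [PySem.Dict.getD_counter]
  exact pv_foldl_cast (fun s => l.count s) l 0

-- B's loop invariant, proved back-to-front
theorem pv_B_inv (l : List Int) :
    (∀ s : Int, (l.foldl (fun (st : PySem.Dict Int Int × Int) s =>
        let c := st.1.getD s 0 + 1
        (st.1.insert s c, if c > st.2 then c else st.2))
      (PySem.Dict.empty, 0)).1.getD s 0 = (l.count s : Int)) ∧
    (l.foldl (fun (st : PySem.Dict Int Int × Int) s =>
        let c := st.1.getD s 0 + 1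
        (st.1.insert s c, if c > st.2 then c else st.2))
      (PySem.Dict.empty, 0)).2 = (pvMaxMult l : Int) := by
  induction l using List.reverseRecOn with
  | nil => simp [pvMaxMult, PySem.Dict.getD_empty]
  | append_singleton l x ih =>
    obtain ⟨ih1, ih2⟩ := ih
    rw [List.foldl_append] at *
    simp only [List.foldl_cons, List.foldl_nil]
    have hcx : (l ++ [x]).count x = l.count x + 1 := by
      simp [List.count_append]
    constructor
    · intro s
      rw [PySem.Dict.getD_insert]
      by_cases hsx : s = x
      · subst hsx; rw [if_pos rfl, ih1 s, hcx]; push_cast; ring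
      · rw [if_neg hsx, ih1 s]
        have : (l ++ [x]).count s = l.count s := by
          simp [List.count_append, Ne.symm hsx]
        rw [this]
    · simp only [ih1 x, ih2, pv_maxMult_append, hcx]
      split_ifs with h <;> push_cast at h ⊢ <;> omega

-- ===== VERDICT (by name: the statement is the Claim_ definition above) =====
theorem get_maximum_occurrence_py_spec : Claim_equal_get_maximum_occurrence_py := by
  intro l _
  show get_maximum_occurrence_py l = get_maximum_occurrence_py_alt l
  rw [pv_A_eq, get_maximum_occurrence_py_alt, (pv_B_inv l).2]
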